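-- pv_equiv track=rewrite | github.com/miliar/Code_Jam_Webscraper | solutions_python/Problem_201/1562.py | stall_split
-- ===== SOURCE A (Python) =====
-- from math import ceil, floor
--
-- def stall_split(N,K):
--     left_block_size = 0
--     right_block_size = 0
--     block_size_freqs = {N: 1}
--     while K>0:
--         max_block_size = max(block_size_freqs.keys())
--         max_block_freq = block_size_freqs.pop(max_block_size)
--
--         left_block_size = floor((max_block_size-1)/2)
--         right_block_size = ceil((max_block_size-1)/2)
--         block_size_freqs[left_block_size] = block_size_freqs.get(left_block_size,0) + max_block_freq
--         block_size_freqs[right_block_size] = block_size_freqs.get(right_block_size,0) + max_block_freq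
--
--         K -= max_block_freq
--
--     return str(right_block_size) + " " + str(left_block_size)
-- ===== SOURCE B (Python) =====
-- def stall_split(N, K):
--     # no one enters: initial block is never split
--     if K <= 0:
--         return "0 0"
--     # After the first P-1 people, the stalls form P blocks (a "level"); walk
--     # levels arithmetically: level with P blocks splits N+1 into P parts of
--     # M//P or M//P+1 (M = N+1), the larger parts being taken first.
--     M = N + 1
--     P = 1
--     while K > P:
--         K -= P
--         P += P
--     q, r = divmod(M, P)
--     m = q if K <= r else q - 1
--     left = (m - 1) // 2
--     right = m // 2
--     return str(right) + " " + str(left)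
-- ===== Notes on version B (the rewrite author's own statement) =====
-- stated objective: alternative
-- what changed: The multiset simulation (dict of block-size frequencies, max-scan, splitting classes until K is exhausted) is replaced by pure arithmetic on levels: after P-1 picks the stalls form P blocks whose sizes are M//P or M//P+1 with M=N+1, so B walks K down the level sizes 1,2,4,... and computes the crossing block size with one divmod, never materialising any blocks.
-- outside the precondition, e.g. on stall_split(0, 3): A returns '0 -1', B returns '-1 -1'
import Mathlib
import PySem

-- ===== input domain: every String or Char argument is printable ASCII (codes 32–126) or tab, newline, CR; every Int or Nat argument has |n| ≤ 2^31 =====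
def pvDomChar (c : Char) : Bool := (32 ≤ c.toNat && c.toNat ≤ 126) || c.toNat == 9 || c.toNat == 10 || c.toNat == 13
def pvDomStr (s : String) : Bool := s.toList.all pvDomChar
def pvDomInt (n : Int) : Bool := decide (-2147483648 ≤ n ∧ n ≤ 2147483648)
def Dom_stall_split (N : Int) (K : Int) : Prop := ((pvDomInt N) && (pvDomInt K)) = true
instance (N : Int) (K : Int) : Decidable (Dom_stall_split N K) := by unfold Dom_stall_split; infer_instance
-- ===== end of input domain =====

-- B replaces A's multiset-of-blocks simulation (dict of size frequencies, max()-scan,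
-- class-by-class splitting) by pure level arithmetic: after P-1 picks the stalls form P
-- blocks of size (N+1)//P or (N+1)//P+1, so B walks K down the level sizes 1,2,4,… and
-- computes the crossing block size with one divmod (objective: alternative).

-- ===== PORT A =====
-- Loop of A. Fuel = K.toNat is enough: every stored frequency is ≥ 1, so K strictly
-- decreases each iteration; the fuel-exhausted and empty-dict branches are unreachable.
-- ceil((m-1)/2) on floats is exact here (all values stay far below 2^53) and equals
-- -((-(m-1)) // 2); floor((m-1)/2) equals (m-1) // 2.
def stallALoop : Nat → PySem.Dict Int Int → Int → Int → Int → Int × Int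
  | 0, _, _, left, right => (left, right)
  | fuel+1, d, K, left, right =>
    if K > 0 then
      match PySem.List.max? d.keys (fun x => x) with
      | none => (left, right)      -- max([]) raises; dict is never empty here
      | some m =>
        match d.pop? m with
        | none => (left, right)    -- KeyError; unreachable, m is a key
        | some (f, d1) =>
          let l := PySem.Int.floordiv (m - 1) 2
          let r := -(PySem.Int.floordiv (-(m - 1)) 2)
          let d2 := d1.insert l (d1.getD l 0 + f)
          let d3 := d2.insert r (d2.getD r 0 + f)
          stallALoop fuel d3 (K - f) l r
    else (left, right)

def stall_split (N : Int) (K : Int) : String :=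
  let p := stallALoop K.toNat (PySem.Dict.ofList [(N, 1)]) K 0 0
  PySem.Int.toStr p.2 ++ " " ++ PySem.Int.toStr p.1

-- ===== PORT B =====
-- after the while-loop Source B computes q, r = divmod(M, P) and the crossing size.
def levelFinal (M : Int) (K : Int) (P : Int) : Int :=
  let q := PySem.Int.floordiv M P
  let r := PySem.Int.mod M P
  if K ≤ r then q else q - 1

-- 'while K > P: K -= P; P += P' of Source B. Fuel = K.toNat suffices: the loop body
-- strictly decreases K (P ≥ 1); the fuel-0 fallback is unreachable then.
def levelLoop : Nat → Int → Int → Int → Int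
  | 0, M, K, P => levelFinal M K P
  | fuel+1, M, K, P => if K > P then levelLoop fuel M (K - P) (P + P) else levelFinal M K P

def stall_split_alt (N : Int) (K : Int) : String :=
  if K ≤ 0 then "0 0"
  else
    let m := levelLoop K.toNat (N + 1) K 1
    let left := PySem.Int.floordiv (m - 1) 2
    let right := PySem.Int.floordiv m 2
    PySem.Int.toStr right ++ " " ++ PySem.Int.toStr left

-- ===== PRECONDITION & SPEC =====
-- Pre_ excludes only K > max(N, 0): more picks than stalls, where A's process keeps
-- splitting zero- and negative-size blocks and its answer is an artefact of that
-- accidental regime, which B's level arithmetic does not model.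
def Pre_stall_split (N : Int) (K : Int) : Prop := K ≤ N ∨ K ≤ 0
instance (N : Int) (K : Int) : Decidable (Pre_stall_split N K) := by unfold Pre_stall_split; infer_instance
def pvWitness_stall_split : Int × Int := (5, 3)

def Spec_stall_split (N : Int) (K : Int) (out : String) : Prop := out = stall_split_alt N K
instance (N : Int) (K : Int) (out : String) : Decidable (Spec_stall_split N K out) := by unfold Spec_stall_split; infer_instance

-- ===== CLAIM (what is proved, stated in full; the proofs are below) =====
def Claim_equal_stall_split : Prop := ∀ (N : Int) (K : Int), Dom_stall_split N K → Pre_stall_split N K → Spec_stall_split N K (stall_split N K)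

-- ===== LEMMAS AND PROOFS =====

-- Proof model: A's dict loop is first shown equal to a loop over a largest-first
-- sorted list of (size, count) classes, then that loop is related to B's arithmetic.
def placeB : List (Int × Int) → Int → Int → List (Int × Int)
  | [], s, c => [(s, c)]
  | (a, b) :: rest, s, c =>
    if a > s then (a, b) :: placeB rest s c
    else if a = s then (s, b + c) :: rest
    else (s, c) :: (a, b) :: rest

def classLoop : Nat → List (Int × Int) → Int → Int → Int → Int × Int
  | 0, _, _, left, right => (left, right)
  | fuel+1, blocks, K, left, right =>
    if K > 0 then
      match blocks with
      | [] => (left, right)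
      | (m, f) :: rest =>
        let l := PySem.Int.floordiv (m - 1) 2
        let r := PySem.Int.floordiv m 2
        classLoop fuel (placeB (placeB rest l f) r f) (K - f) l r
    else (left, right)

-- B's list is strictly decreasing in the sizes (hence sizes are distinct).
def pvSortedD (bl : List (Int × Int)) : Prop := bl.Pairwise (fun p q => q.1 < p.1)

theorem pv_ceil_eq (m : Int) : -(PySem.Int.floordiv (-(m - 1)) 2) = PySem.Int.floordiv m 2 := by
  rw [PySem.Int.floordiv_eq_ediv_of_pos (by norm_num), PySem.Int.floordiv_eq_ediv_of_pos (by norm_num)]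
  omega

theorem placeB_key_cases (bl : List (Int × Int)) (s c : Int) :
    ∀ q ∈ placeB bl s c, q.1 = s ∨ q.1 ∈ bl.map Prod.fst := by
  induction bl with
  | nil => intro q hq; simp [placeB] at hq; simp [hq]
  | cons p rest ih =>
    obtain ⟨a, b⟩ := p
    intro q hq
    simp only [placeB] at hq
    split_ifs at hq with h1 h2
    · rcases List.mem_cons.mp hq with h | h
      · subst h; simp
      · rcases ih q h with h' | h' <;> simp [h']
    · rcases List.mem_cons.mp hq with h | h
      · left; rw [h]
      · right
        simp only [List.map_cons, List.mem_cons]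
        right; exact List.mem_map_of_mem h
    · rcases List.mem_cons.mp hq with h | h
      · left; rw [h]
      · right; exact List.mem_map_of_mem h

theorem placeB_sorted (bl : List (Int × Int)) (s c : Int) (h : pvSortedD bl) :
    pvSortedD (placeB bl s c) := by
  induction bl with
  | nil => simp [placeB, pvSortedD]
  | cons p rest ih =>
    obtain ⟨a, b⟩ := p
    unfold pvSortedD at h
    rw [List.pairwise_cons] at h
    obtain ⟨hall, hrest⟩ := h
    simp only [placeB]
    split_ifs with h1 h2
    · unfold pvSortedD
      rw [List.pairwise_cons]
      refine ⟨?_, ih hrest⟩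
      intro q hq
      rcases placeB_key_cases rest s c q hq with h' | h'
      · simpa [h'] using h1
      · obtain ⟨q', hq', hfst⟩ := List.mem_map.mp h'
        have := hall q' hq'
        simp only [← hfst] at this ⊢
        exact this
    · subst h2
      unfold pvSortedD
      rw [List.pairwise_cons]
      exact ⟨fun q hq => hall q hq, hrest⟩
    · unfold pvSortedD
      rw [List.pairwise_cons]
      constructor
      · intro q hq
        rcases List.mem_cons.mp hq with h' | h'
        · rw [h']; omega
        · have := hall q h'; omega
      · rw [List.pairwise_cons]; exact ⟨fun q hq => hall q hq, hrest⟩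

theorem placeB_perm_of_not_mem (bl : List (Int × Int)) (s c : Int)
    (h : s ∉ bl.map Prod.fst) : (placeB bl s c).Perm ((s, c) :: bl) := by
  induction bl with
  | nil => simp [placeB]
  | cons p rest ih =>
    obtain ⟨a, b⟩ := p
    simp only [List.map_cons, List.mem_cons] at h
    push Not at h
    simp only [placeB]
    split_ifs with h1 h2
    · exact ((ih h.2).cons (a, b)).trans (List.Perm.swap (s, c) (a, b) rest)
    · exact absurd h2.symm h.1
    · exact List.Perm.refl _

theorem map_id_of_not_mem (bl : List (Int × Int)) (s : Int) (v : Int × Int)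
    (h : s ∉ bl.map Prod.fst) :
    bl.map (fun p => if (p.1 == s) = true then v else p) = bl := by
  induction bl with
  | nil => rfl
  | cons p rest ih =>
    simp only [List.map_cons, List.mem_cons] at h
    push Not at h
    simp only [List.map_cons]
    rw [if_neg (by simpa using Ne.symm h.1), ih h.2]

theorem placeB_eq_map_of_mem (bl : List (Int × Int)) (s b c : Int)
    (hs : pvSortedD bl) (hmem : (s, b) ∈ bl) :
    placeB bl s c = bl.map (fun p => if (p.1 == s) = true then (s, b + c) else p) := by
  induction bl with
  | nil => cases hmem
  | cons p rest ih =>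
    obtain ⟨a, b0⟩ := p
    unfold pvSortedD at hs
    rw [List.pairwise_cons] at hs
    obtain ⟨hall, hrest⟩ := hs
    simp only [placeB, List.map_cons]
    rcases List.mem_cons.mp hmem with hh | hh
    · obtain ⟨ha, hb⟩ : a = s ∧ b0 = b := by
        have := hh
        simp only [Prod.mk.injEq] at this
        exact ⟨this.1.symm, this.2.symm⟩
      rw [if_neg (by omega), if_pos ha, if_pos (by simp [ha])]
      have hnot : s ∉ rest.map Prod.fst := by
        intro hin
        obtain ⟨q, hq, hfst⟩ := List.mem_map.mp hin
        have := hall q hq; omega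
      rw [hb, map_id_of_not_mem rest s _ hnot]
    · have hlt : s < a := by have := hall _ hh; simpa using this
      rw [if_pos hlt, if_neg (by simp; omega), ih hrest hh]

theorem pv_keys_perm (d : PySem.Dict Int Int) (bl : List (Int × Int))
    (hperm : d.items.Perm bl) : d.keys.Perm (bl.map Prod.fst) := by
  simpa [PySem.Dict.keys] using hperm.map Prod.fst

theorem pv_sorted_keys_nodup (bl : List (Int × Int)) (hs : pvSortedD bl) :
    (bl.map Prod.fst).Nodup := by
  have h1 : (bl.map Prod.fst).Pairwise (fun x y : Int => y < x) :=
    List.Pairwise.map Prod.fst (fun _ _ h => h) hs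
  exact h1.imp (fun h => by omega)

theorem pv_nodup_keys (d : PySem.Dict Int Int) (bl : List (Int × Int))
    (hperm : d.items.Perm bl) (hs : pvSortedD bl) : d.keys.Nodup := by
  exact ((pv_keys_perm d bl hperm).nodup_iff).mpr (pv_sorted_keys_nodup bl hs)

theorem pv_insert_add_perm (d : PySem.Dict Int Int) (bl : List (Int × Int)) (s c : Int)
    (hperm : d.items.Perm bl) (hs : pvSortedD bl) :
    (d.insert s (d.getD s 0 + c)).items.Perm (placeB bl s c) := by
  by_cases hc : d.contains s = true
  · have hnd := pv_nodup_keys d bl hperm hs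
    have hmemk : s ∈ bl.map Prod.fst :=
      (pv_keys_perm d bl hperm).subset ((PySem.Dict.contains_iff_mem_keys d s).mp hc)
    obtain ⟨q, hq, hfst⟩ := List.mem_map.mp hmemk
    obtain ⟨s', b⟩ := q
    simp only at hfst
    subst hfst
    have hb : d.getD s' 0 = b :=
      PySem.Dict.getD_of_mem_items d (hperm.mem_iff.mpr hq) hnd 0
    rw [placeB_eq_map_of_mem bl s' b c hs hq,
        PySem.Dict.items_insert_of_contains d _ hc, hb]
    exact hperm.map _
  · have hcf : d.contains s = false := by simpa using hc
    have hnotmem : s ∉ bl.map Prod.fst := by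
      intro hin
      exact hc ((PySem.Dict.contains_iff_mem_keys d s).mpr
        ((pv_keys_perm d bl hperm).symm.subset hin))
    rw [PySem.Dict.items_insert_of_not_contains d _ hcf,
        PySem.Dict.getD_of_not_contains _ _ hcf, zero_add]
    exact ((hperm.append_right [(s, c)]).trans
      (List.perm_append_singleton (s, c) bl)).trans
      (placeB_perm_of_not_mem bl s c hnotmem).symm

theorem pv_max_head (d : PySem.Dict Int Int) (m f : Int) (rest : List (Int × Int))
    (hperm : d.items.Perm ((m, f) :: rest)) (hs : pvSortedD ((m, f) :: rest)) :
    PySem.List.max? d.keys (fun x => x) = some m := by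
  have hkeys : d.keys.Perm (m :: rest.map Prod.fst) := by
    simpa using pv_keys_perm d _ hperm
  unfold pvSortedD at hs
  rw [List.pairwise_cons] at hs
  obtain ⟨hall, _⟩ := hs
  cases hmax : PySem.List.max? d.keys (fun x => x) with
  | none =>
    rw [PySem.List.max?_eq_none_iff] at hmax
    rw [hmax] at hkeys
    exact absurd hkeys.symm.eq_nil (by simp)
  | some m0 =>
    have h1 : m ≤ m0 :=
      PySem.List.max?_isMax hmax m (hkeys.mem_iff.mpr (by simp))
    have h2 : m0 ∈ m :: rest.map Prod.fst :=
      hkeys.subset (PySem.List.max?_mem hmax)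
    rcases List.mem_cons.mp h2 with h | h
    · rw [h]
    · obtain ⟨q, hq, hfst⟩ := List.mem_map.mp h
      have := hall q hq
      omega

theorem pv_get_head (d : PySem.Dict Int Int) (m f : Int) (rest : List (Int × Int))
    (hperm : d.items.Perm ((m, f) :: rest)) (hs : pvSortedD ((m, f) :: rest)) :
    d.get? m = some f := by
  exact (PySem.Dict.get?_eq_some_iff_mem_items d m f (pv_nodup_keys d _ hperm hs)).mpr
    (hperm.mem_iff.mpr (by simp))

theorem pv_erase_perm (d : PySem.Dict Int Int) (m f : Int) (rest : List (Int × Int))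
    (hperm : d.items.Perm ((m, f) :: rest)) (hs : pvSortedD ((m, f) :: rest)) :
    (d.erase m).items.Perm rest := by
  unfold pvSortedD at hs
  rw [List.pairwise_cons] at hs
  obtain ⟨hall, _⟩ := hs
  have he : (d.erase m).items = d.items.filter (fun p => !(p.1 == m)) := rfl
  rw [he]
  refine (hperm.filter _).trans ?_
  rw [List.filter_cons_of_neg (by simp)]
  rw [List.filter_eq_self.mpr]
  intro q hq
  have := hall q hq
  simp only [Bool.not_eq_eq_eq_not, Bool.not_true, beq_eq_false_iff_ne]
  omega

theorem pv_loop_eq (fuel : Nat) (d : PySem.Dict Int Int) (bl : List (Int × Int))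
    (K left right : Int) (hperm : d.items.Perm bl) (hs : pvSortedD bl) :
    stallALoop fuel d K left right = classLoop fuel bl K left right := by
  induction fuel generalizing d bl K left right with
  | zero => rfl
  | succ n ih =>
    simp only [stallALoop, classLoop]
    by_cases hK : K > 0
    · rw [if_pos hK, if_pos hK]
      cases bl with
      | nil =>
        have hitems : d.items = [] := hperm.eq_nil
        have hkeys : d.keys = [] := by simp [PySem.Dict.keys, hitems]
        simp only [(PySem.List.max?_eq_none_iff _ _).mpr hkeys]
      | cons p rest =>
        obtain ⟨m, f⟩ := p
        have hpop : d.pop? m = some (f, d.erase m) := by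
          simp [PySem.Dict.pop?, pv_get_head d m f rest hperm hs]
        have hs' : pvSortedD rest := by
          unfold pvSortedD at hs ⊢
          exact (List.pairwise_cons.mp hs).2
        have hp1 := pv_erase_perm d m f rest hperm hs
        have hp2 := pv_insert_add_perm (d.erase m) rest
          (PySem.Int.floordiv (m - 1) 2) f hp1 hs'
        have hs2 := placeB_sorted rest (PySem.Int.floordiv (m - 1) 2) f hs'
        have hp3 := pv_insert_add_perm _ (placeB rest (PySem.Int.floordiv (m - 1) 2) f)
          (PySem.Int.floordiv m 2) f hp2 hs2
        have hs3 := placeB_sorted _ (PySem.Int.floordiv m 2) f hs2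
        simp only [pv_max_head d m f rest hperm hs, hpop, pv_ceil_eq m]
        exact ih _ _ _ _ _ hp3 hs3
    · rw [if_neg hK, if_neg hK]

theorem classLoop_stop (fuel : Nat) (bl : List (Int × Int)) (K a b : Int) (h : K ≤ 0) :
    classLoop fuel bl K a b = (a, b) := by
  cases fuel with
  | zero => rfl
  | succ n => simp only [classLoop]; rw [if_neg (by omega)]

theorem levelLoop_stop (fuel : Nat) (M K P : Int) (h : K ≤ P) :
    levelLoop fuel M K P = levelFinal M K P := by
  cases fuel with
  | zero => rfl
  | succ n => simp only [levelLoop]; rw [if_neg (by omega)]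

theorem pv_fdiv_mod_decomp (q P r : Int) (hP : 0 < P) (h0 : 0 ≤ r) (h1 : r < P) :
    PySem.Int.floordiv (q * P + r) P = q ∧ PySem.Int.mod (q * P + r) P = r := by
  rw [PySem.Int.floordiv_eq_ediv_of_pos hP, PySem.Int.mod_eq_emod_of_pos hP]
  constructor
  · rw [add_comm, Int.add_mul_ediv_right r q (by omega),
      Int.ediv_eq_zero_of_lt h0 h1, zero_add]
  · rw [add_comm, Int.add_mul_emod_self_right]
    exact Int.emod_eq_of_lt h0 h1

theorem levelFinal_decomp (q P r K : Int) (hP : 0 < P) (h0 : 0 ≤ r) (h1 : r < P) :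
    levelFinal (q * P + r) K P = if K ≤ r then q else q - 1 := by
  obtain ⟨hd, hm⟩ := pv_fdiv_mod_decomp q P r hP h0 h1
  simp only [levelFinal, hd, hm]

theorem placeB_nil (s c : Int) : placeB [] s c = [(s, c)] := rfl

theorem placeB_cons_gt (rest : List (Int × Int)) (a b s c : Int) (h : s < a) :
    placeB ((a, b) :: rest) s c = (a, b) :: placeB rest s c := by
  simp only [placeB]; rw [if_pos h]

theorem placeB_cons_eq (rest : List (Int × Int)) (a b s c : Int) (h : a = s) :
    placeB ((a, b) :: rest) s c = (s, b + c) :: rest := by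
  simp only [placeB]; rw [if_neg (by omega), if_pos h]

theorem placeB_cons_lt (rest : List (Int × Int)) (a b s c : Int) (h : a < s) :
    placeB ((a, b) :: rest) s c = (s, c) :: (a, b) :: rest := by
  simp only [placeB]; rw [if_neg (by omega), if_neg (by omega)]

theorem classLoop_pop (n : Nat) (m f : Int) (rest : List (Int × Int)) (K a b : Int)
    (h : 0 < K) :
    classLoop (n + 1) ((m, f) :: rest) K a b
      = classLoop n (placeB (placeB rest (PySem.Int.floordiv (m - 1) 2) f)
          (PySem.Int.floordiv m 2) f) (K - f)
          (PySem.Int.floordiv (m - 1) 2) (PySem.Int.floordiv m 2) := by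
  simp only [classLoop]; rw [if_pos h]

-- The main invariant: from the canonical level state (P classes, sizes q-1 and q,
-- r of them big) with 1 ≤ K ≤ M - P remaining, the class loop returns the split of
-- the size computed by B's level arithmetic.
theorem level_main (fc : Nat) : ∀ (fl : Nat) (P q r K l0 r0 : Int),
    1 ≤ P → 0 ≤ r → r < P → 1 ≤ K → K ≤ q * P + r - P →
    K.toNat ≤ fc → K.toNat ≤ fl →
    classLoop fc (if r = 0 then [(q - 1, P)] else [(q, r), (q - 1, P - r)]) K l0 r0
      = (PySem.Int.floordiv (levelLoop fl (q * P + r) K P - 1) 2,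
         PySem.Int.floordiv (levelLoop fl (q * P + r) K P) 2) := by
  induction fc using Nat.strong_induction_on with
  | _ fc ih =>
    intro fl P q r K l0 r0 hP hr0 hrP hK1 hK2 hfc hfl
    obtain ⟨n, rfl⟩ : ∃ n, fc = n + 1 := ⟨fc - 1, by omega⟩
    have hq1 : 1 ≤ q := by nlinarith
    by_cases hr : r = 0
    · subst hr
      rw [if_pos rfl]
      have hq2 : 2 ≤ q := by nlinarith
      rw [classLoop_pop n (q - 1) P [] K l0 r0 (by omega)]
      by_cases hKP : K ≤ P
      · rw [classLoop_stop _ _ _ _ _ (by omega), levelLoop_stop _ _ _ _ hKP,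
          levelFinal_decomp q P 0 K (by omega) (by omega) (by omega), if_neg (by omega)]
      · have hq3 : 3 ≤ q := by nlinarith
        obtain ⟨g, rfl⟩ : ∃ g, fl = g + 1 := ⟨fl - 1, by omega⟩
        have hLL : levelLoop (g + 1) (q * P + 0) K P
            = levelLoop g (q * P + 0) (K - P) (P + P) := by
          simp only [levelLoop]; rw [if_pos (by omega)]
        rw [hLL]
        rcases Int.even_or_odd q with ⟨t, ht⟩ | ⟨t, ht⟩
        · -- q = t + t
          have e1 : PySem.Int.floordiv (q - 1 - 1) 2 = t - 1 := by
            rw [PySem.Int.floordiv_eq_ediv_of_pos (by norm_num : (0:Int) < 2)]; omega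
          have e2 : PySem.Int.floordiv (q - 1) 2 = t - 1 := by
            rw [PySem.Int.floordiv_eq_ediv_of_pos (by norm_num : (0:Int) < 2)]; omega
          rw [e1, e2, placeB_nil, placeB_cons_eq [] (t-1) P (t-1) P rfl]
          have hih := ih n (by omega) g (P + P) t 0 (K - P) (t - 1) (t - 1)
            (by omega) (by omega) (by omega) (by omega) (by nlinarith) (by omega) (by omega)
          rw [if_pos rfl] at hih
          have hMM : t * (P + P) + 0 = q * P + 0 := by rw [ht]; ring
          rw [hMM] at hih
          exact hih
        · -- q = 2*t + 1
          have e1 : PySem.Int.floordiv (q - 1 - 1) 2 = t - 1 := by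
            rw [PySem.Int.floordiv_eq_ediv_of_pos (by norm_num : (0:Int) < 2)]; omega
          have e2 : PySem.Int.floordiv (q - 1) 2 = t := by
            rw [PySem.Int.floordiv_eq_ediv_of_pos (by norm_num : (0:Int) < 2)]; omega
          rw [e1, e2, placeB_nil, placeB_cons_lt [] (t-1) P t P (by omega)]
          have hih := ih n (by omega) g (P + P) t P (K - P) (t - 1) t
            (by omega) (by omega) (by omega) (by omega) (by nlinarith) (by omega) (by omega)
          rw [if_neg (by omega)] at hih
          have hMM : t * (P + P) + P = q * P + 0 := by rw [ht]; ring
          have hc : P + P - P = P := by ring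
          rw [hMM, hc] at hih
          exact hih
    · rw [if_neg hr]
      rw [classLoop_pop n q r [(q - 1, P - r)] K l0 r0 (by omega)]
      by_cases hKr : K ≤ r
      · rw [classLoop_stop _ _ _ _ _ (by omega), levelLoop_stop _ _ _ _ (by omega),
          levelFinal_decomp q P r K (by omega) hr0 hrP, if_pos hKr]
      · have hq2 : 2 ≤ q := by nlinarith
        obtain ⟨n', rfl⟩ : ∃ n', n = n' + 1 := ⟨n - 1, by omega⟩
        by_cases hq2' : q = 2
        · subst hq2'
          have e1 : PySem.Int.floordiv ((2:Int) - 1) 2 = 0 := by decide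
          have e2 : PySem.Int.floordiv (2:Int) 2 = 1 := by decide
          rw [e1, e2, placeB_cons_gt [] (2-1) (P-r) 0 r (by omega), placeB_nil,
            placeB_cons_eq [(0, r)] (2-1) (P-r) 1 r (by omega)]
          rw [classLoop_pop n' 1 (P - r + r) [(0, r)] (K - r) 0 1 (by omega)]
          rw [classLoop_stop _ _ _ _ _ (by omega)]
          by_cases hKP : K ≤ P
          · rw [levelLoop_stop _ _ _ _ hKP,
              levelFinal_decomp 2 P r K (by omega) hr0 hrP, if_neg hKr]
            decide
          · obtain ⟨g, rfl⟩ : ∃ g, fl = g + 1 := ⟨fl - 1, by omega⟩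
            have hLL : levelLoop (g + 1) (2 * P + r) K P
                = levelLoop g (2 * P + r) (K - P) (P + P) := by
              simp only [levelLoop]; rw [if_pos (by omega)]
            rw [hLL, levelLoop_stop _ _ _ _ (by omega)]
            have hMM : (2:Int) * P + r = 1 * (P + P) + r := by ring
            rw [hMM, levelFinal_decomp 1 (P + P) r (K - P) (by omega) hr0 (by omega),
              if_pos (by omega)]
        · have hq3 : 3 ≤ q := by omega
          rcases Int.even_or_odd q with ⟨t, ht⟩ | ⟨t, ht⟩
          · -- q = t + t, t ≥ 2
            have e1 : PySem.Int.floordiv (q - 1) 2 = t - 1 := by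
              rw [PySem.Int.floordiv_eq_ediv_of_pos (by norm_num : (0:Int) < 2)]; omega
            have e2 : PySem.Int.floordiv q 2 = t := by
              rw [PySem.Int.floordiv_eq_ediv_of_pos (by norm_num : (0:Int) < 2)]; omega
            rw [e1, e2, placeB_cons_gt [] (q-1) (P-r) (t-1) r (by omega), placeB_nil,
              placeB_cons_gt [(t-1, r)] (q-1) (P-r) t r (by omega),
              placeB_cons_lt [] (t-1) r t r (by omega)]
            rw [classLoop_pop n' (q - 1) (P - r) [(t, r), (t - 1, r)] (K - r) (t-1) t (by omega)]
            have e3 : PySem.Int.floordiv (q - 1 - 1) 2 = t - 1 := by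
              rw [PySem.Int.floordiv_eq_ediv_of_pos (by norm_num : (0:Int) < 2)]; omega
            rw [e3, e1]
            by_cases hKP : K ≤ P
            · rw [classLoop_stop _ _ _ _ _ (by omega), levelLoop_stop _ _ _ _ hKP,
                levelFinal_decomp q P r K (by omega) hr0 hrP, if_neg hKr, e3, e1]
            · obtain ⟨g, rfl⟩ : ∃ g, fl = g + 1 := ⟨fl - 1, by omega⟩
              have hLL : levelLoop (g + 1) (q * P + r) K P
                  = levelLoop g (q * P + r) (K - P) (P + P) := by
                simp only [levelLoop]; rw [if_pos (by omega)]
              rw [hLL]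
              rw [placeB_cons_gt [(t-1, r)] t r (t-1) (P-r) (by omega),
                placeB_cons_eq [] (t-1) r (t-1) (P-r) rfl,
                placeB_cons_gt [(t-1, r + (P - r))] t r (t-1) (P-r) (by omega),
                placeB_cons_eq [] (t-1) (r + (P - r)) (t-1) (P-r) rfl]
              have hc1 : r + (P - r) + (P - r) = P + P - r := by ring
              have hc2 : K - r - (P - r) = K - P := by ring
              rw [hc1, hc2]
              have hih := ih n' (by omega) g (P + P) t r (K - P) (t - 1) (t - 1)
                (by omega) (by omega) (by omega) (by omega) (by nlinarith) (by omega) (by omega)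
              rw [if_neg hr] at hih
              have hMM : t * (P + P) + r = q * P + r := by rw [ht]; ring
              rw [hMM] at hih
              exact hih
          · -- q = 2*t + 1, t ≥ 1
            have e1 : PySem.Int.floordiv (q - 1) 2 = t := by
              rw [PySem.Int.floordiv_eq_ediv_of_pos (by norm_num : (0:Int) < 2)]; omega
            have e2 : PySem.Int.floordiv q 2 = t := by
              rw [PySem.Int.floordiv_eq_ediv_of_pos (by norm_num : (0:Int) < 2)]; omega
            rw [e1, e2, placeB_cons_gt [] (q-1) (P-r) t r (by omega), placeB_nil,
              placeB_cons_gt [(t, r)] (q-1) (P-r) t r (by omega),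
              placeB_cons_eq [] t r t r rfl]
            rw [classLoop_pop n' (q - 1) (P - r) [(t, r + r)] (K - r) t t (by omega)]
            have e3 : PySem.Int.floordiv (q - 1 - 1) 2 = t - 1 := by
              rw [PySem.Int.floordiv_eq_ediv_of_pos (by norm_num : (0:Int) < 2)]; omega
            rw [e3, e1]
            by_cases hKP : K ≤ P
            · rw [classLoop_stop _ _ _ _ _ (by omega), levelLoop_stop _ _ _ _ hKP,
                levelFinal_decomp q P r K (by omega) hr0 hrP, if_neg hKr, e3, e1]
            · obtain ⟨g, rfl⟩ : ∃ g, fl = g + 1 := ⟨fl - 1, by omega⟩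
              have hLL : levelLoop (g + 1) (q * P + r) K P
                  = levelLoop g (q * P + r) (K - P) (P + P) := by
                simp only [levelLoop]; rw [if_pos (by omega)]
              rw [hLL]
              rw [placeB_cons_gt [] t (r + r) (t-1) (P-r) (by omega), placeB_nil,
                placeB_cons_eq [(t-1, P-r)] t (r + r) t (P-r) rfl]
              have hc2 : K - r - (P - r) = K - P := by ring
              rw [hc2]
              have hc1 : r + r + (P - r) = P + r := by ring
              rw [hc1]
              have hc3 : P - r = P + P - (P + r) := by ring
              rw [hc3]
              have hih := ih n' (by omega) g (P + P) t (P + r) (K - P) (t - 1) t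
                (by omega) (by omega) (by omega) (by omega) (by nlinarith) (by omega) (by omega)
              rw [if_neg (by omega)] at hih
              have hMM : t * (P + P) + (P + r) = q * P + r := by rw [ht]; ring
              rw [hMM] at hih
              exact hih

-- ===== VERDICT (by name: the statement is the Claim_ definition above) =====
theorem stall_split_spec : Claim_equal_stall_split := by
  intro N K hDom hPre
  unfold Spec_stall_split stall_split stall_split_alt
  by_cases hK : K ≤ 0
  · have h0 : K.toNat = 0 := by omega
    rw [if_pos hK, h0]
    show PySem.Int.toStr (0 : Int) ++ " " ++ PySem.Int.toStr (0 : Int) = "0 0"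
    rfl
  · have hKN : K ≤ N := by rcases hPre with h | h; exacts [h, absurd h hK]
    rw [if_neg hK]
    have hA := pv_loop_eq K.toNat (PySem.Dict.ofList [(N, 1)]) [(N, 1)] K 0 0
      (by rfl) (by simp [pvSortedD])
    have hM := level_main K.toNat K.toNat 1 (N + 1) 0 K 0 0
      (by omega) (by omega) (by omega) (by omega) (by omega) (by omega) (by omega)
    norm_num at hM
    rw [hA, hM]
    simp only [PySem.Int.floordiv_eq_ediv_of_pos (show (0:Int) < 2 by norm_num)]
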